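-- pv_equiv track=rewrite | github.com/zyalhor1961/corematch-web | python-service/agents/enrichment_agent.py | find_contact_pages
-- ===== SOURCE A (Python) =====
-- CONTACT_PAGE_PATTERNS = [
--     '/contact',
--     '/nous-contacter',
--     '/contactez-nous',
--     '/mentions-legales',
--     '/legal',
--     '/mentions',
--     '/a-propos',
--     '/about',
--     '/about-us',
--     '/qui-sommes-nous',
--     '/equipe',
--     '/team',
--     '/impressum',
--     '/imprint',
--     '/cgv',
--     '/cgu',
-- ]
--
-- def find_contact_pages(urls: list[str]) -> list[str]:
--     """
--     From a list of discovered URLs, find the most relevant contact pages.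
--     Returns up to 3 most relevant URLs.
--     """
--     contact_urls = []
--
--     for url in urls:
--         url_lower = url.lower()
--         for pattern in CONTACT_PAGE_PATTERNS:
--             if pattern in url_lower:
--                 contact_urls.append(url)
--                 break
--
--     # Prioritize: contact > mentions-legales > a-propos
--     priority_order = ['contact', 'mentions', 'legal', 'about', 'propos', 'equipe', 'team']
--
--     def get_priority(url):
--         url_lower = url.lower()
--         for i, keyword in enumerate(priority_order):
--             if keyword in url_lower:
--                 return i
--         return len(priority_order)
--
--     contact_urls.sort(key=get_priority)
--
--     return contact_urls[:3]  # Max 3 pages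
-- ===== SOURCE B (Python) =====
-- CONTACT_PAGE_PATTERNS = [
--     '/contact',
--     '/nous-contacter',
--     '/contactez-nous',
--     '/mentions-legales',
--     '/legal',
--     '/mentions',
--     '/a-propos',
--     '/about',
--     '/about-us',
--     '/qui-sommes-nous',
--     '/equipe',
--     '/team',
--     '/impressum',
--     '/imprint',
--     '/cgv',
--     '/cgu',
-- ]
--
-- PRIORITY_ORDER = ['contact', 'mentions', 'legal', 'about', 'propos', 'equipe', 'team']
--
--
-- def find_contact_pages(urls: list[str]) -> list[str]:
--     """Bucket distribution by priority instead of sort: O(n) and no comparisons."""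
--     buckets = [[] for _ in range(len(PRIORITY_ORDER) + 1)]
--     for url in urls:
--         url_lower = url.lower()
--         if any(p in url_lower for p in CONTACT_PAGE_PATTERNS):
--             pr = next((i for i, kw in enumerate(PRIORITY_ORDER) if kw in url_lower),
--                       len(PRIORITY_ORDER))
--             buckets[pr].append(url)
--     flat = [u for b in buckets for u in b]
--     return flat[:3]
-- ===== Notes on version B (the rewrite author's own statement) =====
-- stated objective: alternative
-- what changed: Replaces the comparison sort by one-pass bucket distribution: each matching URL is appended (in input order) to the bucket of its first priority keyword (or a last no-keyword bucket), and the buckets are concatenated low-to-high before taking the first 3.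
import Mathlib
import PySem

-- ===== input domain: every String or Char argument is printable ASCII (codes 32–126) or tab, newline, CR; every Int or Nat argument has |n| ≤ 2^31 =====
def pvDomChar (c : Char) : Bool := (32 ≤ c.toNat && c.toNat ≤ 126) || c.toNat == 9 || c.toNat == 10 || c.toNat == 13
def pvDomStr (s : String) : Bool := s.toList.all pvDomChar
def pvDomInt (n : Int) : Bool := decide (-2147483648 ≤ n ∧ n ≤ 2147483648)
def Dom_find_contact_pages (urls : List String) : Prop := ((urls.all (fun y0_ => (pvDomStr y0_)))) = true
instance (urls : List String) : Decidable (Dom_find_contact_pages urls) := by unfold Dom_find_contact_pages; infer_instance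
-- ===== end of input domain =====

-- B replaces A's comparison sort by a one-pass bucket distribution over priorities (alternative decomposition, same results).

-- ===== PORT A =====
def contactPatterns : List String :=
  ["/contact", "/nous-contacter", "/contactez-nous", "/mentions-legales", "/legal",
   "/mentions", "/a-propos", "/about", "/about-us", "/qui-sommes-nous", "/equipe",
   "/team", "/impressum", "/imprint", "/cgv", "/cgu"]

def priorityOrder : List String :=
  ["contact", "mentions", "legal", "about", "propos", "equipe", "team"]

-- the inner 'for pattern …: if pattern in url_lower: append; break' loop of A
def matchLoopA : List String → String → Bool
  | [], _ => false
  | p :: ps, ul => if PySem.Str.isIn p ul then true else matchLoopA ps ul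

-- A's get_priority: 'for i, keyword in enumerate(priority_order): if keyword in url_lower: return i / return len(priority_order)'
def gpLoopA : Int → List String → String → Int
  | _, [], _ => (priorityOrder.length : Int)
  | i, kw :: kws, ul => if PySem.Str.isIn kw ul then i else gpLoopA (i + 1) kws ul

def getPriorityA (url : String) : Int := gpLoopA 0 priorityOrder (PySem.Str.lower url)

def find_contact_pages (urls : List String) : List String :=
  let contact_urls := urls.foldl
    (fun acc url => if matchLoopA contactPatterns (PySem.Str.lower url) then acc ++ [url] else acc) []
  let sortedUrls := PySem.List.sorted contact_urls getPriorityA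
  PySem.List.slice sortedUrls none (some 3)

-- ===== PORT B =====
def contactPatternsB : List String :=
  ["/contact", "/nous-contacter", "/contactez-nous", "/mentions-legales", "/legal",
   "/mentions", "/a-propos", "/about", "/about-us", "/qui-sommes-nous", "/equipe",
   "/team", "/impressum", "/imprint", "/cgv", "/cgu"]

def priorityOrderB : List String :=
  ["contact", "mentions", "legal", "about", "propos", "equipe", "team"]

def matchesB (ul : String) : Bool := contactPatternsB.any (fun p => PySem.Str.isIn p ul)

-- next((i for i, kw in enumerate(PRIORITY_ORDER) if kw in url_lower), len(PRIORITY_ORDER))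
def prioB (ul : String) : Nat :=
  (priorityOrderB.findIdx? (fun kw => PySem.Str.isIn kw ul)).getD priorityOrderB.length

def find_contact_pages_alt (urls : List String) : List String :=
  let buckets := urls.foldl
    (fun bks url =>
      let ul := PySem.Str.lower url
      if matchesB ul then
        let pr := prioB ul
        bks.set pr (bks.getD pr [] ++ [url])
      else bks)
    (List.replicate (priorityOrderB.length + 1) [])
  PySem.List.slice buckets.flatten none (some 3)

-- ===== PRECONDITION & SPEC =====
def Spec_find_contact_pages (urls : List String) (out : List String) : Prop := out = find_contact_pages_alt urls
instance (urls : List String) (out : List String) : Decidable (Spec_find_contact_pages urls out) := by unfold Spec_find_contact_pages; infer_instance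

-- ===== CLAIM (what is proved, stated in full; the proofs are below) =====
def Claim_equal_find_contact_pages : Prop := ∀ (urls : List String), Dom_find_contact_pages urls → Spec_find_contact_pages urls (find_contact_pages urls)

-- ===== LEMMAS AND PROOFS =====

-- x passes a prefix none of whose elements it must precede
theorem insertBy_append_nolt {α : Type} (k : α → Int) (x : α) (pref rest : List α)
    (h : ∀ y ∈ pref, ¬ k x < k y) :
    PySem.List.insertBy (fun a b => decide (k a < k b)) x (pref ++ rest)
      = pref ++ PySem.List.insertBy (fun a b => decide (k a < k b)) x rest := by
  induction pref with
  | nil => simp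
  | cons y ys ih =>
    have hy : ¬ k x < k y := h y (by simp)
    simp [PySem.List.insertBy, hy]
    exact ih (fun z hz => h z (by simp [hz]))

theorem insertBy_front {α : Type} (k : α → Int) (x : α) (rest : List α)
    (h : ∀ y ∈ rest, k x < k y) :
    PySem.List.insertBy (fun a b => decide (k a < k b)) x rest = x :: rest := by
  cases rest with
  | nil => rfl
  | cons y ys => simp [PySem.List.insertBy, h y (by simp)]

-- stable insertion into a key-grouped concatenation appends x at the end of its key's group
theorem insertBy_grouped {α : Type} (k : α → Int) (x : α) :
    ∀ (vs : List Int) (ys : List α), vs.Pairwise (· < ·) → k x ∈ vs →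
    PySem.List.insertBy (fun a b => decide (k a < k b)) x
        (vs.flatMap (fun v => ys.filter (fun y => k y == v)))
      = vs.flatMap (fun v => (ys ++ [x]).filter (fun y => k y == v)) := by
  intro vs
  induction vs with
  | nil => intro ys _ hx; simp at hx
  | cons v vs ih =>
    intro ys hp hx
    have hp' : vs.Pairwise (· < ·) := hp.of_cons
    have hlt : ∀ w ∈ vs, v < w := fun w hw => List.rel_of_pairwise_cons hp hw
    by_cases hv : k x = v
    · have h1 : ∀ y ∈ ys.filter (fun y => k y == v), ¬ k x < k y := by
        intro y hy
        have h2 : k y = v := by simpa using (List.mem_filter.mp hy).2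
        omega
      have h2 : ∀ y ∈ vs.flatMap (fun w => ys.filter (fun y => k y == w)), k x < k y := by
        intro y hy
        obtain ⟨w, hw, hyf⟩ := List.mem_flatMap.mp hy
        have : k y = w := by simpa using (List.mem_filter.mp hyf).2
        have := hlt w hw
        omega
      rw [List.flatMap_cons, insertBy_append_nolt k x _ _ h1, insertBy_front k x _ h2,
          List.flatMap_cons]
      have h3 : (ys ++ [x]).filter (fun y => k y == v) = ys.filter (fun y => k y == v) ++ [x] := by
        rw [List.filter_append]; simp [hv]
      have h4 : vs.flatMap (fun w => (ys ++ [x]).filter (fun y => k y == w))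
          = vs.flatMap (fun w => ys.filter (fun y => k y == w)) := by
        apply List.flatMap_congr
        intro w hw
        rw [List.filter_append]
        have : ¬ (k x = w) := by have := hlt w hw; omega
        simp [this]
      rw [h3, h4]
      simp
    · have hx' : k x ∈ vs := by
        cases List.mem_cons.mp hx with
        | inl h => exact absurd h hv
        | inr h => exact h
      have h1 : ∀ y ∈ ys.filter (fun y => k y == v), ¬ k x < k y := by
        intro y hy
        have h3 : k y = v := by simpa using (List.mem_filter.mp hy).2
        have : v < k x := hlt _ hx'
        omega
      rw [List.flatMap_cons, insertBy_append_nolt k x _ _ h1, ih ys hp' hx',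
          List.flatMap_cons]
      congr 1
      rw [List.filter_append]
      simp [hv]

-- Python's stable sort by an Int key with values among vs is the concatenation of the key groups
theorem sorted_grouped {α : Type} (k : α → Int) (vs : List Int) (hvs : vs.Pairwise (· < ·)) :
    ∀ (xs : List α), (∀ x ∈ xs, k x ∈ vs) →
    PySem.List.sorted xs k = vs.flatMap (fun v => xs.filter (fun y => k y == v)) := by
  intro xs
  induction xs using List.reverseRecOn with
  | nil => intro _; simp [PySem.List.sorted]
  | append_singleton ys x ih =>
    intro h
    rw [PySem.List.sorted_eq_foldl_insertBy, List.foldl_append, ← PySem.List.sorted_eq_foldl_insertBy]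
    simp only [List.foldl_cons, List.foldl_nil]
    rw [ih (fun y hy => h y (by simp [hy]))]
    exact insertBy_grouped k x vs ys hvs (h x (by simp))

theorem matchLoopA_eq_any : ∀ (ps : List String) (ul : String),
    matchLoopA ps ul = ps.any (fun p => PySem.Str.isIn p ul) := by
  intro ps
  induction ps with
  | nil => intro ul; rfl
  | cons p ps ih =>
    intro ul
    simp [matchLoopA, ih ul]

theorem gpLoopA_none (ul : String) : ∀ (kws : List String) (i : Int),
    kws.findIdx? (fun kw => PySem.Str.isIn kw ul) = none →
    gpLoopA i kws ul = (priorityOrder.length : Int) := by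
  intro kws
  induction kws with
  | nil => intro i _; rfl
  | cons kw kws ih =>
    intro i h
    rw [List.findIdx?_cons] at h
    by_cases hk : PySem.Chars.isIn kw.toList ul.toList = true
    · simp [hk] at h
    · simp [hk] at h
      simp [gpLoopA, PySem.Str.isIn, hk]
      exact ih _ (by simp [PySem.Str.isIn]; exact h)

theorem gpLoopA_some (ul : String) : ∀ (kws : List String) (i : Int) (j : Nat),
    kws.findIdx? (fun kw => PySem.Str.isIn kw ul) = some j →
    gpLoopA i kws ul = i + (j : Int) := by
  intro kws
  induction kws with
  | nil => intro i j h; simp at h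
  | cons kw kws ih =>
    intro i j h
    rw [List.findIdx?_cons] at h
    by_cases hk : PySem.Chars.isIn kw.toList ul.toList = true
    · simp [hk] at h
      simp [gpLoopA, PySem.Str.isIn, hk, ← h]
    · simp [hk] at h
      obtain ⟨j', hj', rfl⟩ := h
      simp [gpLoopA, PySem.Str.isIn, hk]
      rw [ih _ _ (by simp [PySem.Str.isIn]; exact hj')]
      ring

theorem prioB_le (ul : String) : prioB ul ≤ 7 := by
  unfold prioB
  cases h : priorityOrderB.findIdx? (fun kw => PySem.Str.isIn kw ul) with
  | none => simp [priorityOrderB]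
  | some j =>
    have := List.findIdx?_eq_some_iff_findIdx_eq.mp h
    simp [priorityOrderB] at this ⊢
    omega

theorem gp_eq_prio (url : String) : getPriorityA url = ((prioB (PySem.Str.lower url) : Nat) : Int) := by
  unfold getPriorityA prioB
  cases h : priorityOrderB.findIdx? (fun kw => PySem.Str.isIn kw (PySem.Str.lower url)) with
  | none =>
    rw [gpLoopA_none _ _ _ (by simpa [priorityOrderB, priorityOrder] using h)]
    simp [priorityOrder, priorityOrderB]
  | some j =>
    rw [gpLoopA_some _ _ _ _ (by simpa [priorityOrderB, priorityOrder] using h)]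
    simp

theorem getD_set_eq {α : Type} (l : List α) (p : Nat) (v d : α) (i : Nat) (hp : p < l.length) :
    (l.set p v).getD i d = if p = i then v else l.getD i d := by
  simp [List.getD, List.getElem?_set]
  split_ifs with h
  · subst h; simp
  · rfl

theorem flatten_eq_flatMap_range {α : Type} : ∀ (l : List (List α)),
    l.flatten = (List.range l.length).flatMap (fun i => l.getD i []) := by
  intro l
  induction l with
  | nil => simp
  | cons a t ih =>
    simp only [List.flatten_cons, List.length_cons, List.range_succ_eq_map]
    rw [List.flatMap_cons]
    simp only [List.flatMap_map]
    rw [ih]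
    rfl

-- B's bucket-filling fold body, named for the lemmas below
def stepB (bks : List (List String)) (url : String) : List (List String) :=
  let ul := PySem.Str.lower url
  if matchesB ul then
    let pr := prioB ul
    bks.set pr (bks.getD pr [] ++ [url])
  else bks

theorem stepB_length (bks : List (List String)) (url : String) :
    (stepB bks url).length = bks.length := by
  by_cases hm : matchesB (PySem.Str.lower url)
  · simp [stepB, hm]
  · simp [stepB, hm]

theorem foldB_length : ∀ (urls : List String) (bks : List (List String)),
    (urls.foldl stepB bks).length = bks.length := by
  intro urls
  induction urls with
  | nil => intro bks; rfl
  | cons u urls ih => intro bks; rw [List.foldl_cons, ih, stepB_length]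

theorem foldB_getD : ∀ (urls : List String) (bks : List (List String)), bks.length = 8 →
    ∀ i, i < 8 →
    (urls.foldl stepB bks).getD i []
      = bks.getD i [] ++ urls.filter
          (fun u => matchesB (PySem.Str.lower u) && (prioB (PySem.Str.lower u) == i)) := by
  intro urls
  induction urls with
  | nil => intro bks _ i _; simp
  | cons u urls ih =>
    intro bks hlen i hi
    rw [List.foldl_cons]
    by_cases hm : matchesB (PySem.Str.lower u)
    · have hpr : prioB (PySem.Str.lower u) < bks.length := by
        have := prioB_le (PySem.Str.lower u); omega
      have hstep : stepB bks u
          = bks.set (prioB (PySem.Str.lower u))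
              (bks.getD (prioB (PySem.Str.lower u)) [] ++ [u]) := by
        unfold stepB; simp [hm]
      rw [ih (stepB bks u) (by rw [stepB_length, hlen]) i hi, hstep,
          getD_set_eq _ _ _ _ _ hpr]
      by_cases hpi : prioB (PySem.Str.lower u) = i
      · simp [hm, hpi]
      · simp [hm, hpi]
    · have hstep : stepB bks u = bks := by unfold stepB; simp [hm]
      rw [ih (stepB bks u) (by rw [stepB_length, hlen]) i hi, hstep]
      simp [hm]

theorem inner_eq (urls : List String) :
    PySem.List.sorted
      (urls.foldl (fun acc url =>
        if matchLoopA contactPatterns (PySem.Str.lower url) then acc ++ [url] else acc) [])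
      getPriorityA
    = (urls.foldl stepB (List.replicate 8 [])).flatten := by
  -- A's accumulation loop is a filter
  have hA : List.foldl (fun acc url =>
        if matchLoopA contactPatterns (PySem.Str.lower url) = true then acc ++ [url] else acc) [] urls
      = List.filter (fun url => matchLoopA contactPatterns (PySem.Str.lower url)) urls := by
    simpa using PySem.List.foldl_append_if
      (fun url => matchLoopA contactPatterns (PySem.Str.lower url)) id urls []
  rw [hA]
  -- A's sort groups by priority
  have hvs : ([0,1,2,3,4,5,6,7] : List Int).Pairwise (· < ·) := by decide
  have hmem : ∀ x ∈ urls.filter (fun url => matchLoopA contactPatterns (PySem.Str.lower url)),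
      getPriorityA x ∈ ([0,1,2,3,4,5,6,7] : List Int) := by
    intro x _
    rw [gp_eq_prio]
    have := prioB_le (PySem.Str.lower x)
    simp only [List.mem_cons, List.not_mem_nil, or_false]
    omega
  rw [sorted_grouped getPriorityA _ hvs _ hmem]
  have hr : ([0,1,2,3,4,5,6,7] : List Int).flatMap
        (fun v => (urls.filter (fun url => matchLoopA contactPatterns (PySem.Str.lower url))).filter
          (fun y => getPriorityA y == v))
      = (List.range 8).flatMap
        (fun i => (urls.filter (fun url => matchLoopA contactPatterns (PySem.Str.lower url))).filter
          (fun y => getPriorityA y == ((i : Nat) : Int))) := by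
    rfl
  rw [hr]
  -- B's buckets are the same groups
  rw [flatten_eq_flatMap_range, foldB_length]
  simp only [List.length_replicate]
  apply List.flatMap_congr
  intro i hi
  rw [foldB_getD urls _ (by simp) i (List.mem_range.mp hi)]
  have hrep : (List.replicate 8 ([] : List String)).getD i [] = [] := by
    have h8 := List.mem_range.mp hi
    interval_cases i <;> rfl
  rw [hrep, List.nil_append]
  rw [List.filter_filter]
  apply List.filter_congr
  intro u _
  rw [matchLoopA_eq_any]
  have hcb : contactPatternsB = contactPatterns := rfl
  by_cases hn : prioB (PySem.Str.lower u) = i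
  · simp [matchesB, hcb, gp_eq_prio, hn, Bool.and_comm]
  · have h1 : ((getPriorityA u) == ((i : Nat) : Int)) = false := by
      rw [gp_eq_prio]; simp [hn]
    have h2 : ((prioB (PySem.Str.lower u)) == i) = false := by simp [hn]
    simp [matchesB, hcb, h1, h2]

theorem find_contact_pages_spec' : ∀ urls, find_contact_pages urls = find_contact_pages_alt urls :=
  fun urls => congrArg (fun l => PySem.List.slice l none (some 3)) (inner_eq urls)

-- ===== VERDICT (by name: the statement is the Claim_ definition above) =====
theorem find_contact_pages_spec : Claim_equal_find_contact_pages := by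
  intro urls _
  unfold Spec_find_contact_pages
  exact find_contact_pages_spec' urls
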